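-- pv_equiv track=rewrite | github.com/aster-rpc/aster-rpc | bindings/python/aster/contract/manifest.py | _strip_generic_wrapper
-- ===== SOURCE A (Python) =====
-- def _strip_generic_wrapper(name: str) -> str:
--     """Pull the inner type out of a generic wrapper string.
--
--     ``AsyncIterator[CommandResult]`` -> ``CommandResult``
--     ``Optional[Foo]`` -> ``Foo``
--     ``list[Bar]`` -> ``Bar``
--     ``Foo`` -> ``Foo``
--
--     Recurses for nested wrappers (``AsyncIterator[Optional[X]]`` -> ``X``).
--     For union/comma-separated forms, picks the first non-None component.
--     """
--     s = name.strip()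
--     while "[" in s and s.endswith("]"):
--         bracket = s.index("[")
--         s = s[bracket + 1:-1].strip()
--         if "," in s:
--             parts = [p.strip() for p in s.split(",")]
--             s = next((p for p in parts if p and p != "None"), parts[0])
--     return s
-- ===== SOURCE B (Python) =====
-- def _strip_generic_wrapper(name: str) -> str:
--     s = name.strip()
--     if '[' not in s or not s.endswith(']'):
--         return s
--     inner = s[s.index('[') + 1:-1].strip()
--     if ',' in inner:
--         pieces = inner.split(',')
--         chosen = None
--         for q in pieces:
--             p = q.strip()
--             if p and p != 'None':
--                 chosen = p
--                 break
--         inner = chosen if chosen is not None else pieces[0].strip()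
--     return _strip_generic_wrapper(inner)
-- ===== Notes on version B (the rewrite author's own statement) =====
-- stated objective: alternative
-- what changed: B replaces A's while-loop (strip once, then mutate s in place, with a comma-pick via a list comprehension and next-with-default) by a base-case-first recursion over the nested-wrapper structure that strips on entry and scans the raw comma pieces with an explicit for/else loop, stripping each piece as it is visited.
import Mathlib
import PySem

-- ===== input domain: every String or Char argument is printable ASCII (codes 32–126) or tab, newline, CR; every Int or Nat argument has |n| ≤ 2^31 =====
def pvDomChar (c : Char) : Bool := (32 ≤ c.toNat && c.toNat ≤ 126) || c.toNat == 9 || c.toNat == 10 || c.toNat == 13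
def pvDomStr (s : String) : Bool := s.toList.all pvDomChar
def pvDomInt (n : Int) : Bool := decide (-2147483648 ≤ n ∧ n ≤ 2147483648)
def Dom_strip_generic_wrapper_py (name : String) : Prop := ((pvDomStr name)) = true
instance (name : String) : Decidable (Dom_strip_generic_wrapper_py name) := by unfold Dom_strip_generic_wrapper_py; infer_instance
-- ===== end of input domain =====

-- B re-decomposes A's while-loop as a base-case-first recursion over the nested-wrapper
-- structure, with an explicit scan over the raw comma pieces; same cost, alternative shape.

-- ===== PORT A =====
-- A's while-loop, fueled (fuel = |name| + 1 is ample: each iteration shortens s by ≥ 2).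
def stripLoopA : Nat → List Char → List Char
  | 0, s => s
  | fuel+1, s =>
    if PySem.Chars.isIn ['['] s && PySem.Chars.endswith s [']'] then
      -- bracket = s.index('['); the guard makes '[' present, so index = find here
      let bracket := PySem.Chars.find s ['[']
      let s1 := PySem.Chars.strip (PySem.Chars.slice s (some (bracket + 1)) (some (-1)))
      let s2 := if PySem.Chars.isIn [','] s1 then
          let parts := (PySem.Chars.splitOn s1 [',']).map PySem.Chars.strip
          -- next((p for p in parts if p and p != 'None'), parts[0]); parts is never []
          (parts.find? (fun p => !p.isEmpty && p ≠ "None".toList)).getD (parts.getD 0 [])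
        else s1
      stripLoopA fuel s2
    else s

def strip_generic_wrapper_py (name : String) : String :=
  String.ofList (stripLoopA (name.toList.length + 1) (PySem.Chars.strip name.toList))

-- ===== PORT B =====
-- first piece p = q.strip() with p truthy and p != 'None', if any (B's for/break loop)
def pickFirstB : List (List Char) → Option (List Char)
  | [] => none
  | q :: rest =>
    let p := PySem.Chars.strip q
    if !p.isEmpty && p ≠ "None".toList then some p else pickFirstB rest

-- B's recursion, fueled (depth ≤ |name|; on fuel exhaustion return the stripped input)
def stripRecB : Nat → List Char → List Char
  | 0, s => PySem.Chars.strip s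
  | fuel+1, s =>
    let s' := PySem.Chars.strip s
    if !(PySem.Chars.isIn ['['] s') || !(PySem.Chars.endswith s' [']']) then s'
    else
      let inner0 := PySem.Chars.strip
        (PySem.Chars.slice s' (some (PySem.Chars.find s' ['['] + 1)) (some (-1)))
      let inner := if PySem.Chars.isIn [','] inner0 then
          let pieces := PySem.Chars.splitOn inner0 [',']
          match pickFirstB pieces with
          | some p => p
          | none => PySem.Chars.strip (pieces.getD 0 [])
        else inner0
      stripRecB fuel inner

def strip_generic_wrapper_py_alt (name : String) : String :=
  String.ofList (stripRecB (name.toList.length + 1) name.toList)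

-- ===== PRECONDITION & SPEC =====
def Spec_strip_generic_wrapper_py (name : String) (out : String) : Prop := out = strip_generic_wrapper_py_alt name
instance (name : String) (out : String) : Decidable (Spec_strip_generic_wrapper_py name out) := by unfold Spec_strip_generic_wrapper_py; infer_instance

-- ===== CLAIM (what is proved, stated in full; the proofs are below) =====
def Claim_equal_strip_generic_wrapper_py : Prop := ∀ (name : String), Dom_strip_generic_wrapper_py name → Spec_strip_generic_wrapper_py name (strip_generic_wrapper_py name)

-- ===== LEMMAS AND PROOFS =====

lemma dropWhile_idem {α : Type} (p : α → Bool) (l : List α) :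
    (l.dropWhile p).dropWhile p = l.dropWhile p := by
  induction l with
  | nil => rfl
  | cons a l ih =>
    by_cases h : p a
    · simp [h, ih]
    · simp [h]

lemma lstrip_idem (s : List Char) :
    PySem.Chars.lstrip (PySem.Chars.lstrip s) = PySem.Chars.lstrip s := by
  simp only [PySem.Chars.lstrip]
  exact dropWhile_idem _ _

lemma rstrip_prefix (s : List Char) : PySem.Chars.rstrip s <+: s := by
  simpa [PySem.Chars.rstrip, ← List.reverse_suffix] using
    (List.dropWhile_suffix (l := s.reverse) (p := PySem.Chars.isspace))

lemma lstrip_of_prefix {t u : List Char}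
    (ht : PySem.Chars.lstrip t = t) (hu : u <+: t) :
    PySem.Chars.lstrip u = u := by
  cases u with
  | nil => rfl
  | cons a u' =>
    cases t with
    | nil => exact absurd (List.prefix_nil.mp hu) (by simp)
    | cons b t' =>
      obtain ⟨hab, -⟩ := List.cons_prefix_cons.mp hu
      subst hab
      by_cases hsp : PySem.Chars.isspace a = true
      · exfalso
        have h1 : List.dropWhile PySem.Chars.isspace t' = a :: t' := by
          simpa [PySem.Chars.lstrip, hsp] using ht
        have h2 := List.length_dropWhile_le PySem.Chars.isspace t'
        rw [h1] at h2
        simp at h2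
      · simp [PySem.Chars.lstrip, hsp]

lemma strip_idem (s : List Char) :
    PySem.Chars.strip (PySem.Chars.strip s) = PySem.Chars.strip s := by
  unfold PySem.Chars.strip
  rw [lstrip_of_prefix (lstrip_idem s) (rstrip_prefix _)]
  simp only [PySem.Chars.rstrip, List.reverse_reverse]
  rw [dropWhile_idem]

-- B's explicit scan (strip each piece as visited) equals A's find?-with-default over
-- the pre-stripped pieces
lemma pick_eq (pieces : List (List Char)) (d : List Char) :
    ((pieces.map PySem.Chars.strip).find? (fun p => !p.isEmpty && p ≠ "None".toList)).getD d
      = (match pickFirstB pieces with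
         | some p => p
         | none => d) := by
  induction pieces with
  | nil => rfl
  | cons q rest ih =>
    simp only [List.map_cons, pickFirstB]
    by_cases hq : (!(PySem.Chars.strip q).isEmpty
        && decide (PySem.Chars.strip q ≠ "None".toList)) = true
    · simp only [List.find?_cons, hq]
      rfl
    · have hq' : (!(PySem.Chars.strip q).isEmpty
          && decide (PySem.Chars.strip q ≠ "None".toList)) = false := by
        simpa using hq
      simp only [List.find?_cons, hq']
      exact ih

lemma mapStrip_getD (pieces : List (List Char)) :
    (pieces.map PySem.Chars.strip).getD 0 [] = PySem.Chars.strip (pieces.getD 0 []) := by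
  cases pieces <;> rfl

-- the value B recurses on is already stripped
lemma pickFirstB_stripped {pieces : List (List Char)} {p : List Char}
    (h : pickFirstB pieces = some p) : PySem.Chars.strip p = p := by
  induction pieces with
  | nil => simp [pickFirstB] at h
  | cons q rest ih =>
    simp only [pickFirstB] at h
    split at h
    · cases h; exact strip_idem q
    · exact ih h

lemma loop_eq_rec (fuel : Nat) (s : List Char) :
    stripLoopA fuel (PySem.Chars.strip s) = stripRecB fuel s := by
  induction fuel generalizing s with
  | zero => rfl
  | succ fuel ih =>
    have key : ∀ t : List Char, PySem.Chars.strip t = t →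
        stripLoopA fuel t = stripRecB fuel t := by
      intro t ht
      have h := ih t
      rw [ht] at h
      exact h
    simp only [stripLoopA, stripRecB]
    by_cases h1 : PySem.Chars.isIn ['['] (PySem.Chars.strip s) = true
    · by_cases h2 : PySem.Chars.endswith (PySem.Chars.strip s) [']'] = true
      · simp only [h1, h2, Bool.and_self, Bool.not_true, Bool.or_self, if_true,
          Bool.false_eq_true, if_false]
        by_cases hc : PySem.Chars.isIn [','] (PySem.Chars.strip
            (PySem.Chars.slice (PySem.Chars.strip s)
              (some (PySem.Chars.find (PySem.Chars.strip s) ['['] + 1)) (some (-1)))) = true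
        · simp only [hc, if_true]
          rw [mapStrip_getD, pick_eq]
          apply key
          rcases hp : pickFirstB (PySem.Chars.splitOn (PySem.Chars.strip
              (PySem.Chars.slice (PySem.Chars.strip s)
                (some (PySem.Chars.find (PySem.Chars.strip s) ['['] + 1)) (some (-1)))) [',']) with _ | p
          · simp only []
            exact strip_idem _
          · simp only []
            exact pickFirstB_stripped hp
        · simp only [hc, Bool.false_eq_true, if_false]
          exact key _ (strip_idem _)
      · simp [h1, h2]
    · simp [h1]

-- ===== VERDICT (by name: the statement is the Claim_ definition above) =====
theorem strip_generic_wrapper_py_spec : Claim_equal_strip_generic_wrapper_py := by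
  intro name _
  unfold Spec_strip_generic_wrapper_py strip_generic_wrapper_py strip_generic_wrapper_py_alt
  rw [loop_eq_rec]
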